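-- pv_equiv track=rewrite | github.com/mike10004/smatterscripts | _common/strings.py | remove_suffix
-- ===== SOURCE A (Python) =====
-- from typing import Collection
--
-- def remove_suffix(s: str, suffix: str, other_suffixes: Collection[str]=None):
--     all_suffixes = [suffix]
--     if other_suffixes:
--         all_suffixes += other_suffixes
--     all_suffixes.sort(key=len, reverse=True)
--     for suffix_ in filter(lambda x: len(x) > 0, all_suffixes):
--         if s.endswith(suffix_):
--             return s[:-len(suffix_)]
--     return s
-- ===== SOURCE B (Python) =====
-- def remove_suffix(s: str, suffix: str, other_suffixes=None):
--     candidates = [suffix]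
--     if other_suffixes:
--         candidates += other_suffixes
--     best = 0
--     for suf in candidates:
--         if suf and s.endswith(suf) and len(suf) > best:
--             best = len(suf)
--     return s[:-best] if best > 0 else s
-- ===== Notes on version B (the rewrite author's own statement) =====
-- stated objective: simpler
-- what changed: B replaces the sort-by-length-then-first-match loop by a single max-scan over the candidate suffixes that tracks the longest matching suffix length, then slices once.
import Mathlib
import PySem

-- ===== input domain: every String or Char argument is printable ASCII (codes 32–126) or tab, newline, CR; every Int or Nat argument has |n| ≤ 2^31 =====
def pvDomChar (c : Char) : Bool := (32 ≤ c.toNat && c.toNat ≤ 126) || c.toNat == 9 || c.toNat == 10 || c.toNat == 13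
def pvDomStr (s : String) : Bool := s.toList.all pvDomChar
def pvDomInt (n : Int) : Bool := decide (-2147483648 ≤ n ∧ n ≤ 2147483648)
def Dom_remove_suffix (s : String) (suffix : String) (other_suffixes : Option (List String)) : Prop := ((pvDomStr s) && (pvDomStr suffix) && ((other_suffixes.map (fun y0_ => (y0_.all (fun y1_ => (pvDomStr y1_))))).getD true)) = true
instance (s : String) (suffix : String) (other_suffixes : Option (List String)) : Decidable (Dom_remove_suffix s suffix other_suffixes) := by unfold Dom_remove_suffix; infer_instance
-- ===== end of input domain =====

-- B replaces A's sort-by-length-then-first-match by a single max-scan of the candidate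
-- suffixes tracking the longest matching length (objective: simpler).

-- ===== PORT A =====
-- A's 'for suffix_ in filter(lambda x: len(x) > 0, all_suffixes): if s.endswith(suffix_): return s[:-len(suffix_)]'
def removeSuffixLoop (s : String) : List String → String
  | [] => s
  | x :: t =>
    if PySem.Str.len x > 0 then
      if PySem.Str.endswith s x then PySem.Str.slice s none (some (-(PySem.Str.len x : Int)))
      else removeSuffixLoop s t
    else removeSuffixLoop s t

def remove_suffix (s : String) (suffix : String) (other_suffixes : Option (List String)) : String :=
  let all_suffixes := [suffix]
  let all_suffixes := match other_suffixes with
    | none => all_suffixes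
    | some l => if l.isEmpty then all_suffixes else all_suffixes ++ l
  removeSuffixLoop s (PySem.List.sorted all_suffixes (fun x => PySem.Str.len x) true)

-- ===== PORT B =====
def remove_suffix_alt (s : String) (suffix : String) (other_suffixes : Option (List String)) : String :=
  let candidates := [suffix]
  let candidates := match other_suffixes with
    | none => candidates
    | some l => if l.isEmpty then candidates else candidates ++ l
  let best : Int := candidates.foldl
    (fun best suf =>
      if suf ≠ "" && PySem.Str.endswith s suf && decide (best < PySem.Str.len suf)
      then PySem.Str.len suf else best) 0
  if 0 < best then PySem.Str.slice s none (some (-best)) else s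

-- ===== PRECONDITION & SPEC =====
def Spec_remove_suffix (s : String) (suffix : String) (other_suffixes : Option (List String)) (out : String) : Prop := out = remove_suffix_alt s suffix other_suffixes
instance (s : String) (suffix : String) (other_suffixes : Option (List String)) (out : String) : Decidable (Spec_remove_suffix s suffix other_suffixes out) := by unfold Spec_remove_suffix; infer_instance

-- ===== CLAIM (what is proved, stated in full; the proofs are below) =====
def Claim_equal_remove_suffix : Prop := ∀ (s : String) (suffix : String) (other_suffixes : Option (List String)), Dom_remove_suffix s suffix other_suffixes → Spec_remove_suffix s suffix other_suffixes (remove_suffix s suffix other_suffixes)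

-- ===== LEMMAS AND PROOFS =====

-- B's update step
def pvF (s : String) (best : Int) (suf : String) : Int :=
  if suf ≠ "" && PySem.Str.endswith s suf && decide (best < PySem.Str.len suf)
  then PySem.Str.len suf else best

theorem pvF_eq_max (s : String) (b : Int) (x : String) :
    pvF s b x = if x ≠ "" && PySem.Str.endswith s x then max b (PySem.Str.len x) else b := by
  unfold pvF
  by_cases hc : (x ≠ "" && PySem.Str.endswith s x) = true
  · rw [hc]
    simp only [Bool.true_and, decide_eq_true_eq, if_true]
    split_ifs <;> omega
  · have hc' : (x ≠ "" && PySem.Str.endswith s x) = false := by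
      cases h : (x ≠ "" && PySem.Str.endswith s x) with
      | false => rfl
      | true => exact absurd h hc
    rw [hc']
    simp only [Bool.false_and, Bool.false_eq_true, if_false]

theorem pvF_comm (s : String) (b : Int) (x y : String) :
    pvF s (pvF s b x) y = pvF s (pvF s b y) x := by
  simp only [pvF_eq_max]
  split_ifs <;> omega

theorem foldl_pvF_perm (s : String) {l₁ l₂ : List String} (h : l₁.Perm l₂) (b : Int) :
    l₁.foldl (pvF s) b = l₂.foldl (pvF s) b := by
  induction h generalizing b with
  | nil => rfl
  | cons x _ ih => simp only [List.foldl]; exact ih _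
  | swap x y l => simp only [List.foldl, pvF_comm]
  | trans _ _ ih₁ ih₂ => exact (ih₁ b).trans (ih₂ b)

theorem foldl_pvF_stable (s : String) (l : List String) (b : Int)
    (h : ∀ x ∈ l, PySem.Str.len x ≤ b) : l.foldl (pvF s) b = b := by
  induction l with
  | nil => rfl
  | cons x t ih =>
    have hx : PySem.Str.len x ≤ b := h x (by simp)
    have hF : pvF s b x = b := by
      rw [pvF_eq_max]
      split_ifs <;> omega
    simp only [List.foldl, hF]
    exact ih (fun y hy => h y (by simp [hy]))

theorem loop_eq_fold (s : String) (l : List String)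
    (hp : l.Pairwise (fun a b => PySem.Str.len b ≤ PySem.Str.len a)) :
    removeSuffixLoop s l =
      (if 0 < l.foldl (pvF s) 0 then
        PySem.Str.slice s none (some (-(l.foldl (pvF s) 0))) else s) := by
  induction l with
  | nil => simp [removeSuffixLoop, List.foldl]
  | cons x t ih =>
    have ht : ∀ y ∈ t, PySem.Str.len y ≤ PySem.Str.len x :=
      (List.pairwise_cons.mp hp).1
    have htp : t.Pairwise (fun a b => PySem.Str.len b ≤ PySem.Str.len a) :=
      (List.pairwise_cons.mp hp).2
    by_cases hlen : PySem.Str.len x > 0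
    · by_cases he : PySem.Str.endswith s x = true
      · have hne : x ≠ "" := by
          intro hx; subst hx; exact absurd hlen (by decide)
        have hF : pvF s 0 x = PySem.Str.len x := by
          rw [pvF_eq_max,
            if_pos (by simp only [Bool.and_eq_true, decide_eq_true_eq]; exact ⟨hne, he⟩)]
          omega
        have hstable : t.foldl (pvF s) (PySem.Str.len x) = PySem.Str.len x :=
          foldl_pvF_stable s t _ ht
        simp only [removeSuffixLoop, if_pos hlen, if_pos he, List.foldl, hF, hstable]
      · have hF : pvF s 0 x = 0 := by
          rw [pvF_eq_max,
            if_neg (by intro hcond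
                       exact he (And.right ((Bool.and_eq_true _ _).mp hcond)))]
        simp only [removeSuffixLoop, if_pos hlen, if_neg he, List.foldl, hF]
        exact ih htp
    · have hF : pvF s 0 x = 0 := by
        unfold pvF
        rw [if_neg (by
          intro hcond
          exact hlen (of_decide_eq_true (And.right ((Bool.and_eq_true _ _).mp hcond))))]
      simp only [removeSuffixLoop, if_neg hlen, List.foldl, hF]
      exact ih htp

theorem sorted_fold_eq (s : String) (l : List String) :
    removeSuffixLoop s (PySem.List.sorted l (fun x => PySem.Str.len x) true) =
      (if 0 < l.foldl (pvF s) 0 then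
        PySem.Str.slice s none (some (-(l.foldl (pvF s) 0))) else s) := by
  rw [loop_eq_fold s _ (PySem.List.sorted_pairwise_rev l (fun x => PySem.Str.len x)),
    foldl_pvF_perm s (PySem.List.sorted_perm l (fun x => PySem.Str.len x) true)]

-- ===== VERDICT (by name: the statement is the Claim_ definition above) =====
theorem remove_suffix_spec : Claim_equal_remove_suffix := by
  intro s suffix other_suffixes _
  show remove_suffix s suffix other_suffixes = remove_suffix_alt s suffix other_suffixes
  unfold remove_suffix remove_suffix_alt
  cases other_suffixes with
  | none => exact sorted_fold_eq s [suffix]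
  | some ls =>
    by_cases h : ls.isEmpty
    · simp only [h, if_true]
      exact sorted_fold_eq s [suffix]
    · simp only [h, if_false, Bool.false_eq_true]
      exact sorted_fold_eq s ([suffix] ++ ls)
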